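-- pv_equiv track=rewrite | github.com/Limexcyan/mgreks | utils.py | is_noncrossing
-- ===== SOURCE A (Python) =====
-- def is_noncrossing(partition):
--     """
--     Returns True if partition is non-crossing.
--     :param partition: partition of
--     """
--     element_to_block = {}
--     for block_index, block in enumerate(partition):
--         for element in block:
--             element_to_block[element] = block_index
--
--     sorted_elements = sorted(element_to_block.keys())
--     n = len(sorted_elements)
--     for i in range(n):
--         for j in range(i+1, n):
--             for k in range(j+1, n):
--                 for l in range(k+1, n):
--                     a, b, c, d = sorted_elements[i], sorted_elements[j], sorted_elements[k], sorted_elements[l]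
--                     if (element_to_block[a] == element_to_block[c] and
--                         element_to_block[b] == element_to_block[d] and
--                         element_to_block[a] != element_to_block[b]):
--                         return False
--     return True
-- ===== SOURCE B (Python) =====
-- def is_noncrossing(partition):
--     element_to_block = {}
--     for block_index, block in enumerate(partition):
--         for element in block:
--             element_to_block[element] = block_index
--
--     blocks = [element_to_block[e] for e in sorted(element_to_block.keys())]
--     n = len(blocks)
--     for i in range(n):
--         for k in range(i + 2, n):
--             if blocks[i] == blocks[k]:
--                 inner = {blocks[j] for j in range(i + 1, k) if blocks[j] != blocks[i]}
--                 for l in range(k + 1, n):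
--                     if blocks[l] in inner:
--                         return False
--     return True
-- ===== Notes on version B (the rewrite author's own statement) =====
-- stated objective: alternative
-- what changed: Replaces A's quadruple loop over all index 4-tuples by a scan over same-block index pairs (i,k): the blocks strictly between i and k are collected once into a set and the suffix after k is checked for membership, eliminating two nested loops.
import Mathlib
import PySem

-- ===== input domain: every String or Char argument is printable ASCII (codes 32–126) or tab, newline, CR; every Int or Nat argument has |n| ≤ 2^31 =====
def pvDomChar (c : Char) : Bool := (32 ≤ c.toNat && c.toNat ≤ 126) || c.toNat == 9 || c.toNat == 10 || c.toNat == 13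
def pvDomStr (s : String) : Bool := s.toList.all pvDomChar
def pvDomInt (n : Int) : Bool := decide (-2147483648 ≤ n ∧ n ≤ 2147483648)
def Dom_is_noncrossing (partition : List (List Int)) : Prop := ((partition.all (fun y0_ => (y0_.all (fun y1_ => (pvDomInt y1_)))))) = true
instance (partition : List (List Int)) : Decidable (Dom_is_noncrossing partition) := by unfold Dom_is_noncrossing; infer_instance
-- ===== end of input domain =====

-- B replaces A's scan over all index quadruples by a scan over same-block pairs (i,k)
-- with a set of the blocks strictly between them checked against the suffix (alternative decomposition).

-- ===== PORT A =====
def is_noncrossing (partition : List (List Int)) : Bool :=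
  let e2b : PySem.Dict Int Int :=
    (PySem.List.enumerate partition).foldl
      (fun d p => p.2.foldl (fun d e => d.insert e p.1) d) PySem.Dict.empty
  let sorted_elements := PySem.List.sorted (PySem.Dict.keys e2b) (fun x => x) false
  let n : Int := sorted_elements.length
  if (PySem.List.pyRange 0 n 1).any (fun i =>
      (PySem.List.pyRange (i+1) n 1).any (fun j =>
        (PySem.List.pyRange (j+1) n 1).any (fun k =>
          (PySem.List.pyRange (k+1) n 1).any (fun l =>
            let a := PySem.List.pyGetD sorted_elements i 0
            let b := PySem.List.pyGetD sorted_elements j 0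
            let c := PySem.List.pyGetD sorted_elements k 0
            let dd := PySem.List.pyGetD sorted_elements l 0
            (e2b.getD a 0 == e2b.getD c 0) && (e2b.getD b 0 == e2b.getD dd 0) &&
              (e2b.getD a 0 != e2b.getD b 0)))))
  then false else true

-- ===== PORT B =====
def is_noncrossing_alt (partition : List (List Int)) : Bool :=
  let e2b : PySem.Dict Int Int :=
    (PySem.List.enumerate partition).foldl
      (fun d p => p.2.foldl (fun d e => d.insert e p.1) d) PySem.Dict.empty
  let blocks : List Int :=
    (PySem.List.sorted (PySem.Dict.keys e2b) (fun x => x) false).map (fun e => e2b.getD e 0)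
  let n : Int := blocks.length
  if (PySem.List.pyRange 0 n 1).any (fun i =>
      (PySem.List.pyRange (i + 2) n 1).any (fun k =>
        (PySem.List.pyGetD blocks i 0 == PySem.List.pyGetD blocks k 0) &&
          (let inner : PySem.Set Int :=
            PySem.Set.ofList (((PySem.List.pyRange (i + 1) k 1).filter
                (fun j => PySem.List.pyGetD blocks j 0 != PySem.List.pyGetD blocks i 0)).map
              (fun j => PySem.List.pyGetD blocks j 0))
           (PySem.List.pyRange (k + 1) n 1).any
             (fun l => PySem.Set.contains inner (PySem.List.pyGetD blocks l 0)))))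
  then false else true

-- ===== PRECONDITION & SPEC =====
def Spec_is_noncrossing (partition : List (List Int)) (out : Bool) : Prop := out = is_noncrossing_alt partition
instance (partition : List (List Int)) (out : Bool) : Decidable (Spec_is_noncrossing partition out) := by unfold Spec_is_noncrossing; infer_instance

-- ===== CLAIM (what is proved, stated in full; the proofs are below) =====
def Claim_equal_is_noncrossing : Prop := ∀ (partition : List (List Int)), Dom_is_noncrossing partition → Spec_is_noncrossing partition (is_noncrossing partition)

-- ===== LEMMAS AND PROOFS =====

-- The quadruple search of A and the pair-with-set search of B find the same thing,
-- for any two index-to-block functions f, g that agree on [0, n).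
theorem quad_eq_pair (f g : Int → Int) (n : Int)
    (hfg : ∀ i : Int, 0 ≤ i → i < n → f i = g i) :
    ((PySem.List.pyRange 0 n 1).any (fun i =>
      (PySem.List.pyRange (i+1) n 1).any (fun j =>
        (PySem.List.pyRange (j+1) n 1).any (fun k =>
          (PySem.List.pyRange (k+1) n 1).any (fun l =>
            (f i == f k) && (f j == f l) && (f i != f j))))))
    =
    ((PySem.List.pyRange 0 n 1).any (fun i =>
      (PySem.List.pyRange (i + 2) n 1).any (fun k =>
        (g i == g k) &&
          ((PySem.List.pyRange (k + 1) n 1).any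
             (fun l => PySem.Set.contains
               (PySem.Set.ofList (((PySem.List.pyRange (i + 1) k 1).filter
                   (fun j => g j != g i)).map (fun j => g j)))
               (g l)))))) := by
  rw [Bool.eq_iff_iff]
  simp only [List.any_eq_true, PySem.List.mem_pyRange_one, PySem.Set.contains_iff,
    PySem.Set.mem_ofList, List.mem_map, List.mem_filter, Bool.and_eq_true, beq_iff_eq,
    bne_iff_ne, ne_eq]
  constructor
  · rintro ⟨i, hi, j, hj, k, hk, l, hl, ⟨hik, hjl⟩, hij⟩
    refine ⟨i, by omega, k, by omega, ?_, l, by omega, j, ⟨⟨by omega, by omega⟩, ?_⟩, ?_⟩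
    · rw [← hfg i (by omega) (by omega), ← hfg k (by omega) (by omega)]; exact hik
    · rw [← hfg j (by omega) (by omega), ← hfg i (by omega) (by omega)]
      exact fun h => hij h.symm |>.elim
    · rw [← hfg l (by omega) (by omega), ← hfg j (by omega) (by omega)]; exact hjl
  · rintro ⟨i, hi, k, hk, hik, l, hl, j, ⟨hj, hji⟩, hlj⟩
    refine ⟨i, by omega, j, by omega, k, by omega, l, by omega, ⟨?_, ?_⟩, ?_⟩
    · rw [hfg i (by omega) (by omega), hfg k (by omega) (by omega)]; exact hik
    · rw [hfg j (by omega) (by omega), hfg l (by omega) (by omega)]; exact hlj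
    · rw [hfg i (by omega) (by omega), hfg j (by omega) (by omega)]
      exact fun h => hji h.symm

theorem ite_not_congr (x y : Bool) (h : x = y) :
    (if x then false else true) = (if y then false else true) := by rw [h]

-- ===== VERDICT (by name: the statement is the Claim_ definition above) =====
theorem is_noncrossing_spec : Claim_equal_is_noncrossing := by
  intro partition _
  unfold Spec_is_noncrossing is_noncrossing is_noncrossing_alt
  simp only [List.length_map]
  exact ite_not_congr _ _ (quad_eq_pair _ _ _ (by
    intro i h0 hn
    rw [PySem.List.pyGetD_eq_getElem _ _ h0 hn,
        PySem.List.pyGetD_eq_getElem _ _ h0 (by simpa using hn),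
        List.getElem_map]))
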